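-- pv_equiv track=rewrite | github.com/zmelce/factcheck | factcheck_pipeline/publisherFR/francetvinfo/francetvinfo_videos.py | _dedupe_keep_shortest_prefix
-- ===== SOURCE A (Python) =====
-- def _dedupe_keep_shortest_prefix(urls):
--     urls = sorted(set(urls), key=lambda x: (len(x), x))
--     out = []
--     for u in urls:
--         if any(u.startswith(k) for k in out):
--             continue
--         out = [k for k in out if not k.startswith(u)]
--         out.append(u)
--     return out
-- ===== SOURCE B (Python) =====
-- def _dedupe_keep_shortest_prefix(urls):
--     # A URL survives iff no *proper* prefix of it occurs in the input set;
--     # test each of its prefixes against a hash set instead of scanning kept URLs.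
--     s = set(urls)
--     minimal = [u for u in s if not any(u[:i] in s for i in range(len(u)))]
--     return sorted(minimal, key=lambda x: (len(x), x))
-- ===== Notes on version B (the rewrite author's own statement) =====
-- stated objective: faster
-- what changed: Instead of rescanning and rebuilding the kept list for every URL, B tests each URL's proper prefixes against a hash set of all inputs and sorts the survivors, removing the inner scans entirely.
import Mathlib
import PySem

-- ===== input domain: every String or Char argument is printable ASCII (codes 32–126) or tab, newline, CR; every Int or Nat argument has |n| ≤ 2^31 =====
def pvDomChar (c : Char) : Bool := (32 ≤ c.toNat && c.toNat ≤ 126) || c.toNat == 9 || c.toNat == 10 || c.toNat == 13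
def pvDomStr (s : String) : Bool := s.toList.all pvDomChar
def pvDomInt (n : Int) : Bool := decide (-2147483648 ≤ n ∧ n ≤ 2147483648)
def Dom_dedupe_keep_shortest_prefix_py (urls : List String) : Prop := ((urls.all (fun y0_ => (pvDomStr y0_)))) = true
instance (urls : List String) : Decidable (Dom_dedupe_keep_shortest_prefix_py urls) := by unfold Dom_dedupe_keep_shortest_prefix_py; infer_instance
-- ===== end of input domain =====

-- B replaces A's rescans of the kept list by one hash-set membership test per proper
-- prefix of each URL, then sorts the survivors (objective: faster).

-- ===== PORT A =====
def dedupe_keep_shortest_prefix_py (urls : List String) : List String :=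
  let urls2 := PySem.List.sorted2 (PySem.Set.ofList urls) (fun x => PySem.Str.len x) (fun x => x)
  urls2.foldl (fun out u =>
    if out.any (fun k => PySem.Str.startswith u k) then out
    else (out.filter (fun k => !(PySem.Str.startswith k u))) ++ [u]) []

-- ===== PORT B =====
def dedupe_keep_shortest_prefix_py_alt (urls : List String) : List String :=
  let s : PySem.Set String := PySem.Set.ofList urls
  let minimal := s.filter (fun u =>
    !((PySem.List.pyRange 0 (PySem.Str.len u) 1).any (fun i =>
        PySem.Set.contains s (PySem.Str.slice u none (some i)))))
  PySem.List.sorted2 minimal (fun x => PySem.Str.len x) (fun x => x)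

-- ===== PRECONDITION & SPEC =====
def Spec_dedupe_keep_shortest_prefix_py (urls : List String) (out : List String) : Prop := out = dedupe_keep_shortest_prefix_py_alt urls
instance (urls : List String) (out : List String) : Decidable (Spec_dedupe_keep_shortest_prefix_py urls out) := by unfold Spec_dedupe_keep_shortest_prefix_py; infer_instance

-- ===== CLAIM (what is proved, stated in full; the proofs are below) =====
def Claim_equal_dedupe_keep_shortest_prefix_py : Prop := ∀ (urls : List String), Dom_dedupe_keep_shortest_prefix_py urls → Spec_dedupe_keep_shortest_prefix_py urls (dedupe_keep_shortest_prefix_py urls)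

-- ===== LEMMAS AND PROOFS =====

-- Python's sort key (len(x), x) as one lexicographic key.
def pvKey (x : String) : Lex (Int × String) := toLex (PySem.Str.len x, x)

theorem pvKey_inj : Function.Injective pvKey := by
  intro a b h
  have := congrArg (fun p => (ofLex p).2) h
  simpa [pvKey] using this

theorem pvKey_lt_iff (a b : String) :
    pvKey a < pvKey b ↔
      PySem.Str.len a < PySem.Str.len b ∨ (PySem.Str.len a = PySem.Str.len b ∧ a < b) := by
  simp [pvKey, Prod.Lex.lt_iff]

-- sorted(xs, key=lambda x: (len(x), x)) as a single-key PySem.List.sorted.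
theorem pvSorted2_eq (xs : List String) :
    PySem.List.sorted2 xs (fun x => PySem.Str.len x) (fun x => x) =
      PySem.List.sorted xs pvKey := by
  show List.foldl _ [] xs = _
  rw [PySem.List.sorted_eq_foldl_insertBy]
  have hfn : (fun a b : String =>
        decide (PySem.Str.len a < PySem.Str.len b) ||
          (!decide (PySem.Str.len b < PySem.Str.len a) && decide (a < b)))
      = fun a b => decide (pvKey a < pvKey b) := by
    funext a b
    rcases Nat.lt_trichotomy a.length b.length with h | h | h
    · simp [pvKey_lt_iff, h]
    · simp [pvKey_lt_iff, h]
    · simp [pvKey_lt_iff, h, Nat.lt_asymm h, Nat.ne_of_gt h]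
  simp only [Bool.false_eq_true, if_false, hfn]

-- "u has a proper prefix in s" — the criterion both programs decide.
def pvBad (s : List String) (u : String) : Bool :=
  decide (∃ v ∈ s, v ≠ u ∧ v.toList <+: u.toList)

theorem pvProperLen {v u : String} (hne : v ≠ u) (hp : v.toList <+: u.toList) :
    v.toList.length < u.toList.length := by
  rcases lt_or_eq_of_le hp.length_le with h | h
  · exact h
  · exact absurd (String.toList_inj.mp (hp.eq_of_length h)) hne

-- A proper prefix in s of minimal length is itself prefix-free in s.
theorem pvMinPrefix (s : List String) (u : String)
    (h : ∃ v ∈ s, v ≠ u ∧ v.toList <+: u.toList) :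
    ∃ w ∈ s, w ≠ u ∧ w.toList <+: u.toList ∧ pvBad s w = false := by
  obtain ⟨v, hv, hne, hp⟩ := h
  have main : ∀ n (v : String), v.toList.length ≤ n → v ∈ s → v ≠ u → v.toList <+: u.toList →
      ∃ w ∈ s, w ≠ u ∧ w.toList <+: u.toList ∧ pvBad s w = false := by
    intro n
    induction n with
    | zero =>
      intro v hlen hv hne hp
      refine ⟨v, hv, hne, hp, ?_⟩
      simp only [pvBad, decide_eq_false_iff_not]
      rintro ⟨w, _, hwne, hwp⟩
      have := pvProperLen hwne hwp
      omega
    | succ n ih =>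
      intro v hlen hv hne hp
      cases hb : pvBad s v with
      | false => exact ⟨v, hv, hne, hp, hb⟩
      | true =>
        have hex : ∃ w ∈ s, w ≠ v ∧ w.toList <+: v.toList := by simpa [pvBad] using hb
        obtain ⟨w, hw, hwne, hwp⟩ := hex
        have hlt : w.toList.length < v.toList.length := pvProperLen hwne hwp
        have hltu : v.toList.length < u.toList.length := pvProperLen hne hp
        have hwneu : w ≠ u := by
          intro h'; subst h'; omega
        exact ih w (by omega) hw hwneu (hwp.trans hp)
  exact main v.toList.length v le_rfl hv hne hp

-- The loop of A, over any prefix of the (len,lex)-sorted duplicate-free list L ~ s,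
-- just filters out the URLs that have a proper prefix in s.
theorem pvLoop (s L : List String) (hperm : L.Perm s)
    (hpw : L.Pairwise (fun a b => pvKey a < pvKey b)) :
    ∀ pre, pre <+: L →
      pre.foldl (fun out u =>
          if out.any (fun k => PySem.Str.startswith u k) then out
          else (out.filter (fun k => !(PySem.Str.startswith k u))) ++ [u]) []
        = pre.filter (fun u => !pvBad s u) := by
  intro pre
  induction pre using List.reverseRecOn with
  | nil => intro _; rfl
  | append_singleton pre u ih =>
    intro hpref
    have hpre' : pre <+: L := (List.prefix_append pre [u]).trans hpref
    rw [List.foldl_append, ih hpre', List.filter_append]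
    obtain ⟨rest, hL⟩ := hpref
    -- every k ∈ pre has pvKey k < pvKey u
    have hklt : ∀ k ∈ pre, pvKey k < pvKey u := by
      intro k hk
      have hsub : (pre ++ [u]).Pairwise (fun a b => pvKey a < pvKey b) :=
        hpw.sublist (hL ▸ (List.sublist_append_left _ _))
      exact (List.pairwise_append.mp hsub).2.2 k hk u (by simp)
    -- pre is closed under "smaller key, member of s"
    have hin : ∀ v ∈ s, pvKey v < pvKey u → v ∈ pre := by
      intro v hv hlt
      have hvL : v ∈ L := hperm.mem_iff.mpr hv
      rw [← hL] at hvL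
      rcases List.mem_append.mp hvL with h' | hrest
      · rcases List.mem_append.mp h' with h'' | h''
        · exact h''
        · simp only [List.mem_singleton] at h''
          exact absurd hlt (by simp [h''])
      · have hpw' := hL ▸ hpw
        have := (List.pairwise_append.mp hpw').2.2 u (by simp) v hrest
        exact absurd hlt (lt_asymm this)
    have hmem_s : ∀ k ∈ pre, k ∈ s := by
      intro k hk
      exact hperm.mem_iff.mp (by rw [← hL]; simp [hk])
    -- the `any` test computes exactly pvBad s u
    have hany : (pre.filter (fun u => !pvBad s u)).any
        (fun k => PySem.Str.startswith u k) = pvBad s u := by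
      cases hb : pvBad s u with
      | false =>
        simp only [List.any_eq_false]
        intro k hk
        have hkpre := List.mem_of_mem_filter hk
        have hnot : ¬ ∃ v ∈ s, v ≠ u ∧ v.toList <+: u.toList := by simpa [pvBad] using hb
        rw [PySem.Str.startswith_eq]
        intro hsw
        have hkne : k ≠ u := fun h' => absurd (hklt k hkpre) (by simp [h'])
        exact hnot ⟨k, hmem_s k hkpre, hkne, (PySem.Chars.startswith_iff _ _).mp hsw⟩
      | true =>
        have hex : ∃ v ∈ s, v ≠ u ∧ v.toList <+: u.toList := by simpa [pvBad] using hb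
        obtain ⟨w, hws, hwne, hwp, hwgood⟩ := pvMinPrefix s u hex
        have hwlt : pvKey w < pvKey u := by
          rw [pvKey_lt_iff]
          left
          simp only [PySem.Str.len_eq]
          exact_mod_cast pvProperLen hwne hwp
        simp only [List.any_eq_true]
        refine ⟨w, List.mem_filter.mpr ⟨hin w hws hwlt, by simp [hwgood]⟩, ?_⟩
        rw [PySem.Str.startswith_eq]
        exact (PySem.Chars.startswith_iff _ _).mpr hwp
    simp only [List.foldl_cons, List.foldl_nil]
    rw [hany]
    cases hb : pvBad s u with
    | false =>
      -- u is kept: nothing in out starts with u, filter is the identity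
      have hid : (pre.filter (fun u => !pvBad s u)).filter
          (fun k => !(PySem.Str.startswith k u)) = pre.filter (fun u => !pvBad s u) := by
        apply List.filter_eq_self.mpr
        intro k hk
        have hlt := (pvKey_lt_iff _ _).mp (hklt k (List.mem_of_mem_filter hk))
        simp only [Bool.not_eq_eq_eq_not, Bool.not_true,
          PySem.Str.startswith_eq, ← Bool.not_eq_true]
        intro hsw
        have hp : u.toList <+: k.toList := (PySem.Chars.startswith_iff _ _).mp hsw
        simp only [PySem.Str.len_eq] at hlt
        rcases hlt with h | ⟨hlen, hklt'⟩
        · have := hp.length_le; omega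
        · have : u.toList = k.toList := hp.eq_of_length (by exact_mod_cast hlen.symm)
          have : u = k := String.toList_inj.mp this
          subst this
          exact absurd hklt' (lt_irrefl _)
      rw [hid]
      simp [hb]
    | true =>
      simp [hb]

-- B's per-URL prefix test computes exactly pvBad.
theorem pvPred_eq (s : List String) :
    (fun u => !((PySem.List.pyRange 0 (PySem.Str.len u) 1).any (fun i =>
        PySem.Set.contains s (PySem.Str.slice u none (some i)))))
      = fun u => !pvBad s u := by
  funext u
  congr 1
  cases hb : pvBad s u with
  | false =>
    simp only [List.any_eq_false]
    intro i hi
    have hi' := PySem.List.mem_pyRange_one.mp hi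
    have hnot : ¬ ∃ v ∈ s, v ≠ u ∧ v.toList <+: u.toList := by simpa [pvBad] using hb
    intro hc
    have hv : PySem.Str.slice u none (some i) ∈ s := (PySem.Set.contains_iff _ _).mp hc
    have hvl : (PySem.Str.slice u none (some i)).toList = u.toList.take i.toNat := by
      rw [PySem.Str.toList_slice, PySem.Chars.slice_eq_listSlice, PySem.List.slice_to u.toList hi'.1]
    have hlen : i.toNat < u.toList.length := by
      have := hi'.2
      rw [PySem.Str.len_eq] at this
      omega
    have hne : PySem.Str.slice u none (some i) ≠ u := by
      intro h'
      have := congrArg (fun x => x.toList.length) h'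
      simp only [hvl, List.length_take] at this
      omega
    exact hnot ⟨_, hv, hne, hvl ▸ List.take_prefix _ _⟩
  | true =>
    have hex : ∃ v ∈ s, v ≠ u ∧ v.toList <+: u.toList := by simpa [pvBad] using hb
    obtain ⟨v, hvs, hvne, hvp⟩ := hex
    have hlt : v.toList.length < u.toList.length := pvProperLen hvne hvp
    simp only [List.any_eq_true]
    refine ⟨(v.toList.length : Int), PySem.List.mem_pyRange_one.mpr ⟨by positivity, ?_⟩, ?_⟩
    · rw [PySem.Str.len_eq]; exact_mod_cast hlt
    · apply (PySem.Set.contains_iff _ _).mpr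
      have hvl : (PySem.Str.slice u none (some (v.toList.length : Int))).toList = v.toList := by
        rw [PySem.Str.toList_slice, PySem.Chars.slice_eq_listSlice,
          PySem.List.slice_to u.toList (b := (v.toList.length : Int)) (Int.natCast_nonneg _)]
        simp only [Int.toNat_natCast]
        exact (List.prefix_iff_eq_take.mp hvp).symm
      have : PySem.Str.slice u none (some (v.toList.length : Int)) = v :=
        String.toList_inj.mp hvl
      rw [this]; exact hvs

-- ===== VERDICT (by name: the statement is the Claim_ definition above) =====
theorem dedupe_keep_shortest_prefix_py_spec : Claim_equal_dedupe_keep_shortest_prefix_py := by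
  intro urls _
  unfold Spec_dedupe_keep_shortest_prefix_py
  show (PySem.List.sorted2 (PySem.Set.ofList urls) (fun x => PySem.Str.len x) (fun x => x)).foldl
      (fun out u =>
        if out.any (fun k => PySem.Str.startswith u k) then out
        else (out.filter (fun k => !(PySem.Str.startswith k u))) ++ [u]) []
    = PySem.List.sorted2
        ((PySem.Set.ofList urls).filter (fun u =>
          !((PySem.List.pyRange 0 (PySem.Str.len u) 1).any (fun i =>
              PySem.Set.contains (PySem.Set.ofList urls) (PySem.Str.slice u none (some i))))))
        (fun x => PySem.Str.len x) (fun x => x)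
  rw [pvSorted2_eq, pvSorted2_eq, pvPred_eq]
  have hperm : (PySem.List.sorted (PySem.Set.ofList urls) pvKey).Perm (PySem.Set.ofList urls) :=
    PySem.List.sorted_perm _ _ _
  have hnd : (PySem.List.sorted (PySem.Set.ofList urls) pvKey).Nodup :=
    hperm.nodup_iff.mpr (PySem.Set.nodup_ofList urls)
  have hpwle : (PySem.List.sorted (PySem.Set.ofList urls) pvKey).Pairwise
      (fun a b => pvKey a ≤ pvKey b) := PySem.List.sorted_pairwise _ _
  have hpw : (PySem.List.sorted (PySem.Set.ofList urls) pvKey).Pairwise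
      (fun a b => pvKey a < pvKey b) := by
    refine (hpwle.and hnd).imp ?_
    rintro a b ⟨hle, hne⟩
    exact lt_of_le_of_ne hle (fun h => hne (pvKey_inj h))
  rw [pvLoop (PySem.Set.ofList urls) _ hperm hpw _ (List.prefix_refl _)]
  exact (PySem.List.sorted_eq_of_perm_of_pairwise_lt _ _ pvKey
    (hperm.filter _) (hpw.sublist List.filter_sublist)).symm
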